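-- pv_equiv track=rewrite | github.com/mutiann/neural-lexicon-reader | utils/text.py | text_to_byte_sequence
-- ===== SOURCE A (Python) =====
-- def text_to_byte_sequence(text: str):
--     s = []
--     offsets = []
--     for i, ch in enumerate(text):
--         ch = ch.encode('utf-8')
--         s += list(ch)
--         offsets.extend([i] * len(ch))
--     return s, offsets
-- ===== SOURCE B (Python) =====
-- def text_to_byte_sequence(text: str):
--     s = list(text.encode('utf-8'))
--     offsets = []
--     for i, ch in enumerate(text):
--         o = ord(ch)
--         n = 1 if o < 0x80 else 2 if o < 0x800 else 3 if o < 0x10000 else 4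
--         offsets.extend([i] * n)
--     return s, offsets
-- ===== Notes on version B (the rewrite author's own statement) =====
-- stated objective: alternative
-- what changed: B encodes the whole string once for the byte list and derives offsets from each character's code point via UTF-8 length arithmetic, instead of re-encoding per character and growing both lists in one accumulator loop.
import Mathlib
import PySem

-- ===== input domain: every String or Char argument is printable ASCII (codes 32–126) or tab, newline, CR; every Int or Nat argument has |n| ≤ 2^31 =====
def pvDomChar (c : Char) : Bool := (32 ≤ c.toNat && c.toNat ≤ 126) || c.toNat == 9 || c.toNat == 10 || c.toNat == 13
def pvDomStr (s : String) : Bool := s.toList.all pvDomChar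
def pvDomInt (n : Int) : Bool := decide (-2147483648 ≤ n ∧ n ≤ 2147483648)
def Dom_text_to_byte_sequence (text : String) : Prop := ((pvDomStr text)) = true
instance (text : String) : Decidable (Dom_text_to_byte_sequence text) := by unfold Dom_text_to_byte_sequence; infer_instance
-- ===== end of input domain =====

-- B builds the byte list by one whole-string encode and derives offsets from code-point
-- ranges instead of re-encoding each character inside an accumulator loop (alternative).

-- ===== PORT A =====
-- ch.encode('utf-8') as a list of byte values (exact UTF-8 encoding of one code point)
def pyUtf8 (c : Char) : List Int :=
  let o : Nat := c.toNat
  if o < 0x80 then [Int.ofNat o]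
  else if o < 0x800 then [Int.ofNat (0xC0 + o / 64), Int.ofNat (0x80 + o % 64)]
  else if o < 0x10000 then
    [Int.ofNat (0xE0 + o / 4096), Int.ofNat (0x80 + o / 64 % 64), Int.ofNat (0x80 + o % 64)]
  else
    [Int.ofNat (0xF0 + o / 262144), Int.ofNat (0x80 + o / 4096 % 64),
     Int.ofNat (0x80 + o / 64 % 64), Int.ofNat (0x80 + o % 64)]

def text_to_byte_sequence (text : String) : List Int × List Int :=
  (PySem.List.enumerate text.toList 0).foldl
    (fun (acc : List Int × List Int) p =>
      let ch := pyUtf8 p.2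
      (acc.1 ++ ch, acc.2 ++ List.replicate ch.length p.1))
    ([], [])

-- ===== PORT B =====
-- list(text.encode('utf-8')): whole-string encode = concatenation of per-char encodings
def utf8Len (c : Char) : Nat :=
  if c.toNat < 0x80 then 1 else if c.toNat < 0x800 then 2
  else if c.toNat < 0x10000 then 3 else 4

def text_to_byte_sequence_alt (text : String) : List Int × List Int :=
  (text.toList.flatMap pyUtf8,
   (PySem.List.enumerate text.toList 0).flatMap
     (fun p => List.replicate (utf8Len p.2) p.1))

-- ===== PRECONDITION & SPEC =====
def Spec_text_to_byte_sequence (text : String) (out : List Int × List Int) : Prop := out = text_to_byte_sequence_alt text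
instance (text : String) (out : List Int × List Int) : Decidable (Spec_text_to_byte_sequence text out) := by unfold Spec_text_to_byte_sequence; infer_instance

-- ===== CLAIM (what is proved, stated in full; the proofs are below) =====
def Claim_equal_text_to_byte_sequence : Prop := ∀ (text : String), Dom_text_to_byte_sequence text → Spec_text_to_byte_sequence text (text_to_byte_sequence text)

-- ===== LEMMAS AND PROOFS =====
theorem pyUtf8_length (c : Char) : (pyUtf8 c).length = utf8Len c := by
  unfold pyUtf8 utf8Len; split_ifs with h1 h2 h3 <;> simp [*]

theorem foldl_pair (l : List (Int × Char)) (a b : List Int) :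
    l.foldl
      (fun (acc : List Int × List Int) p =>
        let ch := pyUtf8 p.2
        (acc.1 ++ ch, acc.2 ++ List.replicate ch.length p.1)) (a, b)
    = (a ++ l.flatMap (fun p => pyUtf8 p.2),
       b ++ l.flatMap (fun p => List.replicate (utf8Len p.2) p.1)) := by
  induction l generalizing a b with
  | nil => simp
  | cons x xs ih => rw [List.foldl_cons, ih]; simp [pyUtf8_length]

theorem flatMap_enumerate_snd (xs : List Char) (s : Int) :
    (PySem.List.enumerate xs s).flatMap (fun p => pyUtf8 p.2) = xs.flatMap pyUtf8 := by
  induction xs generalizing s with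
  | nil => simp [PySem.List.enumerate_nil]
  | cons x xs ih => simp [PySem.List.enumerate_cons, ih]

-- ===== VERDICT (by name: the statement is the Claim_ definition above) =====
theorem text_to_byte_sequence_spec : Claim_equal_text_to_byte_sequence := by
  intro text _
  unfold Spec_text_to_byte_sequence text_to_byte_sequence text_to_byte_sequence_alt
  rw [foldl_pair, flatMap_enumerate_snd]
  simp
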